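-- pv_equiv track=rewrite | github.com/WojciechSzczepaniak/Bioinf_ant | graph.py | problem_init
-- ===== SOURCE A (Python) =====
-- def problem_init(data,l):
--     d_len = len(data)
--     matrix = [[l for i in range(d_len)] for y in range(d_len)]
--     pheromone = [[1 for i in range(d_len)] for y in range(d_len)]
--     for i in range(d_len):
--         for j in range(d_len):
--             x = data[i]
--             y = data[j]
--             for e in range(l-1):
--                 x1 = x[e:l]
--                 x2 = y[0:l-e]
--                 if x1 == x2 and i != j:
--                     matrix[i][j] = e
--                     break
--     return(matrix, pheromone, d_len)
-- ===== SOURCE B (Python) =====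
-- def _prefix_function(s):
--     # KMP failure function: pi[i] = length of the longest proper border of s[:i+1]
--     pi = [0] * len(s)
--     k = 0
--     for i in range(1, len(s)):
--         while k > 0 and s[i] != s[k]:
--             k = pi[k - 1]
--         if s[i] == s[k]:
--             k += 1
--         pi[i] = k
--     return pi
--
--
-- def _cell(x, y, l):
--     # smallest e in [0, l-2] with x[e:] == y[:l-e] for the l-truncated strings, else l
--     if len(x) == l:
--         # maximal k with y[:k] a suffix of x is the last prefix-function value of y + sep + x
--         pi = _prefix_function(y + "\x00" + x)
--         k = pi[-1] if pi else 0
--         return l - k if k >= 2 else l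
--     # len(x) < l: x[e:] is shorter than l-e, so the match must swallow all of y
--     e = len(x) - len(y)
--     return e if 0 <= e <= l - 2 and x.endswith(y) else l
--
--
-- def problem_init(data, l):
--     n = len(data)
--     pheromone = [[1] * n for _ in range(n)]
--     if l <= 1:
--         return ([[l] * n for _ in range(n)], pheromone, n)
--     t = [s[:l] for s in data]
--     matrix = [[l if i == j else _cell(t[i], t[j], l) for j in range(n)]
--               for i in range(n)]
--     return (matrix, pheromone, n)
-- ===== Notes on version B (the rewrite author's own statement) =====
-- stated objective: alternative
-- what changed: Replaces the per-pair ascending scan over all cut points e with repeated slice comparisons by a single KMP prefix-function pass over y+sep+x that yields the maximal suffix-prefix overlap directly (plus a closed-form case for strings shorter than l), so the worst-case per-pair work drops from quadratic to linear in l.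
import Mathlib
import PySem

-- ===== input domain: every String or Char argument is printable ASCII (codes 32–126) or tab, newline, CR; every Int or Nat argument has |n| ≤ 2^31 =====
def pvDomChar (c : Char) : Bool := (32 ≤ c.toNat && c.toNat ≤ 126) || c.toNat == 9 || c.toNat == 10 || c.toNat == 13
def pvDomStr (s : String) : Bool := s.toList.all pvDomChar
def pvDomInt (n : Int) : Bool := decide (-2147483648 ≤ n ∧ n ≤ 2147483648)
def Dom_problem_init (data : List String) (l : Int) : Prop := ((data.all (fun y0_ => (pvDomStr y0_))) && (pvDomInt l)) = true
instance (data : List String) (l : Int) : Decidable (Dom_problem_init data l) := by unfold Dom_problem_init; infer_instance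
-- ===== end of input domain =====

-- B replaces A's per-pair ascending scan over all cut points (each checked by a slice
-- comparison) with a single KMP prefix-function pass over y+sep+x giving the maximal
-- suffix-prefix overlap (linear instead of quadratic in l per pair, worst case); same results.

-- ===== PORT A =====
-- the inner 'for e in range(l-1): if x[e:l] == y[0:l-e] and i != j: …; break' loop:
-- returns the first e for which the branch fires, none if the loop runs out
def pvFirstE (x y : String) (l : Int) (i j : Nat) : List Int → Option Int
  | [] => none
  | e :: es =>
    if PySem.Str.slice x (some e) (some l) = PySem.Str.slice y (some 0) (some (l - e)) ∧ i ≠ j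
    then some e else pvFirstE x y l i j es

def problem_init (data : List String) (l : Int) : List (List Int) × List (List Int) × Int :=
  let d_len := data.length
  let matrix := (List.range d_len).map (fun _ => (List.range d_len).map (fun _ => l))
  let pheromone := (List.range d_len).map (fun _ => (List.range d_len).map (fun _ => (1 : Int)))
  let matrix := (List.range d_len).foldl (fun m i =>
    (List.range d_len).foldl (fun m j =>
      let x := data.getD i ""
      let y := data.getD j ""
      match pvFirstE x y l i j (PySem.List.pyRange 0 (l - 1) 1) with
      | none => m
      | some e => m.set i ((m.getD i []).set j e)) m) matrix
  (matrix, pheromone, d_len)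

-- ===== PORT B =====
-- Source B's _prefix_function inner 'while k > 0 and s[i] != s[k]: k = pi[k-1]' loop.
-- The 'if h' : k' < k' guard only makes the recursion structurally terminating; it always
-- holds because every stored pi[j] satisfies pi[j] ≤ j (proved below), so the else is dead.
def pvPfWhile (s : List Char) (pi : List Nat) (c : Char) (k : Nat) : Nat :=
  if h : 0 < k ∧ c ≠ s.getD k ' ' then
    let k' := pi.getD (k - 1) 0
    if h' : k' < k then pvPfWhile s pi c k' else 0
  else k
termination_by k

-- one iteration of the 'for i in range(1, len(s))' loop, state (pi, k)
def pvPfStep (s : List Char) (st : List Nat × Nat) (i : Nat) : List Nat × Nat :=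
  let c := s.getD i ' '
  let k1 := pvPfWhile s st.1 c st.2
  let k2 := if c = s.getD k1 ' ' then k1 + 1 else k1
  (st.1.set i k2, k2)

def pvPrefixFun (s : List Char) : List Nat :=
  (((List.range s.length).drop 1).foldl (pvPfStep s) (List.replicate s.length 0, 0)).1

-- Source B's _cell on the l-truncated strings (as character lists)
def pvCell (x y : List Char) (l : Int) : Int :=
  if (x.length : Int) = l then
    let s := y ++ '\x00' :: x
    let pi := pvPrefixFun s
    let k : Nat := match pi.getLast? with | some v => v | none => 0
    if 2 ≤ k then l - (k : Int) else l
  else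
    let e : Int := (x.length : Int) - (y.length : Int)
    if 0 ≤ e ∧ e ≤ l - 2 ∧ PySem.Chars.endswith x y then e else l

def problem_init_alt (data : List String) (l : Int) : List (List Int) × List (List Int) × Int :=
  let n := data.length
  let pheromone := (List.range n).map (fun _ => (List.range n).map (fun _ => (1 : Int)))
  if l ≤ 1 then
    ((List.range n).map (fun _ => (List.range n).map (fun _ => l)), pheromone, n)
  else
    -- t = [s[:l] for s in data], kept as character lists
    let t := data.map (fun s => PySem.List.slice s.toList none (some l))
    let matrix := (List.range n).map (fun i => (List.range n).map (fun j =>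
      if i = j then l else pvCell (t.getD i []) (t.getD j []) l))
    (matrix, pheromone, n)

-- ===== PRECONDITION & SPEC =====
def Spec_problem_init (data : List String) (l : Int) (out : List (List Int) × List (List Int) × Int) : Prop := out = problem_init_alt data l
instance (data : List String) (l : Int) (out : List (List Int) × List (List Int) × Int) : Decidable (Spec_problem_init data l out) := by unfold Spec_problem_init; infer_instance

-- ===== CLAIM (what is proved, stated in full; the proofs are below) =====
def Claim_equal_problem_init : Prop := ∀ (data : List String) (l : Int), Dom_problem_init data l → Spec_problem_init data l (problem_init data l)

-- ===== LEMMAS AND PROOFS =====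
-- ============ part 2: A normalization ============
theorem getD_set' {α : Type} (l : List α) (i j : Nat) (a d : α) :
    (l.set i a).getD j d = if i = j ∧ i < l.length then a else l.getD j d := by
  simp only [List.getD_eq_getElem?_getD, List.getElem?_set]
  split_ifs with h1 h2 h3 h4 <;> simp_all <;> omega

theorem foldSet_length {α : Type} (f : Nat → α → α) (d : α) (n : Nat) (m : List α) :
    ((List.range n).foldl (fun m i => m.set i (f i (m.getD i d))) m).length = m.length := by
  induction n generalizing m with
  | zero => rfl
  | succ n ih =>
    rw [List.range_succ, List.foldl_append]
    simp only [List.foldl_cons, List.foldl_nil, List.length_set]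
    exact ih m

theorem foldSet_getD {α : Type} (f : Nat → α → α) (d : α) (n : Nat) (m : List α) (k : Nat) :
    ((List.range n).foldl (fun m i => m.set i (f i (m.getD i d))) m).getD k d
      = if k < n ∧ k < m.length then f k (m.getD k d) else m.getD k d := by
  induction n generalizing k with
  | zero => simp
  | succ n ih =>
    rw [List.range_succ, List.foldl_append]
    simp only [List.foldl_cons, List.foldl_nil]
    rw [getD_set', foldSet_length, ih, ih]
    by_cases hk : n = k
    · subst hk
      by_cases hm : n < m.length <;> simp [hm]
    · have h2 : (k < n + 1 ∧ k < m.length) ↔ (k < n ∧ k < m.length) := by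
        constructor <;> rintro ⟨h1, h2⟩ <;> exact ⟨by omega, h2⟩
      simp only [if_congr h2 rfl rfl]
      simp [hk]

def aHit (data : List String) (l : Int) (i j : Nat) : Option Int :=
  pvFirstE (data.getD i "") (data.getD j "") l i j (PySem.List.pyRange 0 (l - 1) 1)

def aEntryF (data : List String) (l : Int) (i j : Nat) (old : Int) : Int :=
  match aHit data l i j with | some e => e | none => old

def aRowFun (data : List String) (l : Int) (i : Nat) (row : List Int) : List Int :=
  (List.range data.length).foldl (fun row j => row.set j (aEntryF data l i j (row.getD j 0))) row

-- A's inner j-loop only rewrites row i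
theorem innerFold_eq (data : List String) (l : Int) (i : Nat) (js : List Nat) (m : List (List Int)) :
    js.foldl (fun m j =>
        match aHit data l i j with
        | none => m
        | some e => m.set i ((m.getD i []).set j e)) m
      = m.set i (js.foldl (fun row j =>
          match aHit data l i j with
          | none => row
          | some e => row.set j e) (m.getD i [])) := by
  induction js generalizing m with
  | nil =>
    simp only [List.foldl_nil]
    by_cases h : i < m.length
    · rw [List.getD_eq_getElem _ _ h, List.set_getElem_self]
    · rw [List.set_eq_of_length_le (by omega)]
  | cons j js ih =>
    simp only [List.foldl_cons]
    cases hhit : aHit data l i j with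
    | none => exact ih m
    | some e =>
      dsimp only
      rw [ih]
      by_cases h : i < m.length
      · rw [getD_set', if_pos ⟨rfl, h⟩, List.set_set]
      · rw [List.set_eq_of_length_le (le_of_not_gt h), List.set_eq_of_length_le (le_of_not_gt h),
          List.set_eq_of_length_le (le_of_not_gt h)]

-- row-step as a set-step
theorem rowStep_eq (data : List String) (l : Int) (i j : Nat) (row : List Int) :
    (match aHit data l i j with
     | none => row
     | some e => row.set j e)
    = row.set j (aEntryF data l i j (row.getD j 0)) := by
  unfold aEntryF
  cases hhit : aHit data l i j with
  | some e => rfl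
  | none =>
    dsimp only
    by_cases h : j < row.length
    · rw [List.getD_eq_getElem _ _ h, List.set_getElem_self]
    · rw [List.set_eq_of_length_le (le_of_not_gt h)]

theorem list_eq_of_getD {α : Type} (d : α) (a b : List α)
    (hlen : a.length = b.length) (h : ∀ k, k < a.length → a.getD k d = b.getD k d) : a = b := by
  apply List.ext_getElem hlen
  intro i h1 h2
  have := h i h1
  rwa [List.getD_eq_getElem _ _ h1, List.getD_eq_getElem _ _ h2] at this

theorem getD_map_range {α : Type} (g : Nat → α) (n i : Nat) (d : α) (hi : i < n) :
    ((List.range n).map g).getD i d = g i := by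
  rw [List.getD_eq_getElem _ _ (by simp [hi])]
  simp

theorem A_norm (data : List String) (l : Int) :
    problem_init data l =
      ((List.range data.length).map (fun i => (List.range data.length).map (fun j => aEntryF data l i j l)),
       (List.range data.length).map (fun _ => (List.range data.length).map (fun _ => (1 : Int))),
       (data.length : Int)) := by
  unfold problem_init
  refine Prod.ext ?_ rfl
  simp only
  have hstep : (fun (m : List (List Int)) (i : Nat) =>
      (List.range data.length).foldl (fun m j =>
        match pvFirstE (data.getD i "") (data.getD j "") l i j (PySem.List.pyRange 0 (l - 1) 1) with
        | none => m
        | some e => m.set i ((m.getD i []).set j e)) m)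
    = (fun (m : List (List Int)) (i : Nat) => m.set i (aRowFun data l i (m.getD i []))) := by
    funext m i
    show (List.range data.length).foldl (fun m j =>
        match aHit data l i j with
        | none => m
        | some e => m.set i ((m.getD i []).set j e)) m = _
    rw [innerFold_eq]
    unfold aRowFun
    congr 1
    exact List.foldl_ext _ _ _ (by intro acc x _; exact rowStep_eq data l i x acc)
  rw [hstep]
  apply list_eq_of_getD []
  · rw [foldSet_length (aRowFun data l) []]
    simp
  · intro k hk
    rw [foldSet_length (aRowFun data l) []] at hk
    simp only [List.length_map, List.length_range] at hk
    rw [foldSet_getD (aRowFun data l) [], if_pos ⟨hk, by simp [hk]⟩]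
    rw [getD_map_range _ _ _ _ hk, getD_map_range _ _ _ _ hk]
    unfold aRowFun
    apply list_eq_of_getD 0
    · rw [foldSet_length (aEntryF data l k) 0]
      simp
    · intro j hj
      rw [foldSet_length (aEntryF data l k) 0] at hj
      simp only [List.length_map, List.length_range] at hj
      rw [foldSet_getD (aEntryF data l k) 0, if_pos ⟨hj, by simp [hj]⟩]
      rw [getD_map_range _ _ _ _ hj, getD_map_range _ _ _ _ hj]
-- ============ part 3: KMP correctness ============
-- maximal (proper) border length of s
def pvMpb (s : List Char) : Nat :=
  Nat.findGreatest (fun k => s.take k = s.drop (s.length - k)) (s.length - 1)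

theorem pvMpb_le (s : List Char) : pvMpb s ≤ s.length - 1 :=
  Nat.findGreatest_le _

theorem pvMpb_spec (s : List Char) : s.take (pvMpb s) = s.drop (s.length - pvMpb s) := by
  have := Nat.findGreatest_spec (m := 0) (n := s.length - 1)
    (P := fun k => s.take k = s.drop (s.length - k)) (Nat.zero_le _) (by simp)
  exact this

theorem pvMpb_ge (s : List Char) (k : Nat) (hk : k ≤ s.length - 1)
    (h : s.take k = s.drop (s.length - k)) : k ≤ pvMpb s :=
  Nat.le_findGreatest hk h

-- a border of a border is a border
theorem wb_trans (s : List Char) (k j : Nat) (hk : k ≤ s.length)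
    (hwk : s.take k = s.drop (s.length - k)) (hj : j ≤ k) :
    (s.take j = s.drop (s.length - j)) ↔ ((s.take k).take j = (s.take k).drop (k - j)) := by
  have h1 : (s.take k).take j = s.take j := by
    rw [List.take_take, min_eq_left hj]
  have h2 : (s.take k).drop (k - j) = s.drop (s.length - j) := by
    rw [hwk, List.drop_drop]
    congr 1
    omega
  rw [h1, h2]

theorem wb_ext (t : List Char) (c : Char) (k : Nat) (hk : k < t.length) :
    ((t ++ [c]).take (k + 1) = (t ++ [c]).drop ((t ++ [c]).length - (k + 1)))
      ↔ (t.take k = t.drop (t.length - k) ∧ t.getD k ' ' = c) := by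
  have hlen : (t ++ [c]).length = t.length + 1 := by simp
  have h1 : (t ++ [c]).take (k + 1) = t.take k ++ [t[k]] := by
    rw [List.take_append_of_le_length (by omega), List.take_succ]
    simp [List.getElem?_eq_getElem hk]
  have h2 : (t ++ [c]).drop ((t ++ [c]).length - (k + 1)) = t.drop (t.length - k) ++ [c] := by
    rw [hlen, show t.length + 1 - (k + 1) = t.length - k by omega,
      List.drop_append_of_le_length (by omega)]
  rw [h1, h2, List.append_singleton_inj]
  rw [List.getD_eq_getElem _ _ hk]
-- ============ part 4: while-loop and step correctness ============
theorem wb_trans' (t : List Char) (n k j : Nat) (ht : t.length = n) (hk : k ≤ n)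
    (hwk : t.take k = t.drop (n - k)) (hj : j ≤ k) :
    (t.take j = t.drop (n - j)) ↔ ((t.take k).take j = (t.take k).drop (k - j)) := by
  subst ht
  exact wb_trans t k j hk hwk hj

theorem pfWhile_spec (s : List Char) (pi : List Nat) (c : Char) (i : Nat)
    (hi : i ≤ s.length)
    (hpi : ∀ j, j < i → pi.getD j 0 = pvMpb (s.take (j + 1))) :
    ∀ k₀, k₀ < i → (s.take i).take k₀ = (s.take i).drop (i - k₀) →
      (pvPfWhile s pi c k₀ ≤ k₀ ∧
        (s.take i).take (pvPfWhile s pi c k₀) = (s.take i).drop (i - pvPfWhile s pi c k₀)) ∧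
      (pvPfWhile s pi c k₀ = 0 ∨ s.getD (pvPfWhile s pi c k₀) ' ' = c) ∧
      (∀ b, b ≤ k₀ → (s.take i).take b = (s.take i).drop (i - b) → s.getD b ' ' = c →
        b ≤ pvPfWhile s pi c k₀) := by
  have ht : (s.take i).length = i := by simp [hi]
  intro k₀
  induction k₀ using Nat.strong_induction_on with
  | _ k₀ IH =>
    intro hk₀ hwb
    by_cases hcond : 0 < k₀ ∧ c ≠ s.getD k₀ ' '
    · -- loop body fires: k' = pi[k₀-1] = mpb (s.take k₀)
      have hk0pos : 0 < k₀ := hcond.1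
      have hpik : pi.getD (k₀ - 1) 0 = pvMpb (s.take k₀) := by
        have := hpi (k₀ - 1) (by omega)
        rwa [show k₀ - 1 + 1 = k₀ by omega] at this
      have hlenk : (s.take k₀).length = k₀ := by simp; omega
      have hk'lt : pi.getD (k₀ - 1) 0 < k₀ := by
        rw [hpik]
        have := pvMpb_le (s.take k₀)
        omega
      have hrw : pvPfWhile s pi c k₀ = pvPfWhile s pi c (pi.getD (k₀ - 1) 0) := by
        rw [pvPfWhile]
        rw [dif_pos hcond, dif_pos hk'lt]
      have htk : (s.take i).take k₀ = s.take k₀ := by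
        rw [List.take_take, min_eq_left (by omega)]
      -- k' is a border of s.take i
      have hwb' : (s.take i).take (pi.getD (k₀ - 1) 0)
          = (s.take i).drop (i - pi.getD (k₀ - 1) 0) := by
        rw [wb_trans' (s.take i) i k₀ (pi.getD (k₀ - 1) 0) ht (by omega) hwb (by omega), htk]
        have := pvMpb_spec (s.take k₀)
        rw [hlenk] at this
        rw [← hpik] at this
        exact this
      have IH' := IH (pi.getD (k₀ - 1) 0) hk'lt (by omega) hwb'
      rw [← hrw] at IH'
      refine ⟨⟨le_trans IH'.1.1 (by omega), IH'.1.2⟩, IH'.2.1, ?_⟩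
      intro b hb hbwb hbc
      rcases Nat.lt_or_ge b k₀ with hblt | hbge
      · -- b < k₀: b is a border of s.take k₀, hence b ≤ mpb (s.take k₀) = k'
        have hb1 : (s.take k₀).take b = (s.take k₀).drop (k₀ - b) := by
          rw [← htk, ← wb_trans' (s.take i) i k₀ b ht (by omega) hwb (by omega)]
          exact hbwb
        have hble : b ≤ pi.getD (k₀ - 1) 0 := by
          rw [hpik]
          exact pvMpb_ge (s.take k₀) b (by omega) (by rw [hlenk]; exact hb1)
        exact IH'.2.2 b hble hbwb hbc
      · -- b = k₀ impossible: s[k₀] ≠ c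
        have : b = k₀ := by omega
        subst this
        exact absurd hbc (by exact fun h => hcond.2 h.symm)
    · -- loop exits: result k₀
      have hrw : pvPfWhile s pi c k₀ = k₀ := by
        rw [pvPfWhile, dif_neg hcond]
      rw [hrw]
      refine ⟨⟨le_refl _, hwb⟩, ?_, fun b hb _ _ => hb⟩
      rcases Nat.eq_zero_or_pos k₀ with h0 | hpos
      · exact Or.inl h0
      · by_cases hc : c = s.getD k₀ ' '
        · exact Or.inr hc.symm
        · exact absurd ⟨hpos, hc⟩ hcond
-- ============ part 5: one step of the outer loop computes the next mpb ============
theorem pfStep_mpb (s : List Char) (pi : List Nat) (k i : Nat)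
    (h1 : 1 ≤ i) (hi : i < s.length)
    (hpi : ∀ j, j < i → pi.getD j 0 = pvMpb (s.take (j + 1)))
    (hk : k = pvMpb (s.take i)) :
    (pvPfStep s (pi, k) i).2 = pvMpb (s.take (i + 1)) := by
  have ht : (s.take i).length = i := by simp; omega
  set c := s.getD i ' ' with hc
  have htx : s.take (i + 1) = s.take i ++ [c] := by
    rw [List.take_succ, List.getElem?_eq_getElem hi, hc, s.getD_eq_getElem ' ' hi]
    rfl
  have hkwb : (s.take i).take k = (s.take i).drop (i - k) := by
    have := pvMpb_spec (s.take i)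
    rw [ht] at this
    rw [hk]
    exact this
  have hklt : k < i := by
    have := pvMpb_le (s.take i)
    rw [ht] at this
    omega
  obtain ⟨⟨hrle, hrwb⟩, hror, hrmax⟩ :=
    pfWhile_spec s pi c i (by omega) hpi k hklt hkwb
  set r := pvPfWhile s pi c k with hr
  have hrlt : r < i := by omega
  have hstep : (pvPfStep s (pi, k) i).2 = if c = s.getD r ' ' then r + 1 else r := rfl
  rw [hstep]
  have hlen1 : (s.take (i + 1)).length = i + 1 := by simp; omega
  have hext : ∀ b, b < i →
      ((s.take (i + 1)).take (b + 1) = (s.take (i + 1)).drop ((i + 1) - (b + 1))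
        ↔ ((s.take i).take b = (s.take i).drop (i - b) ∧ s.getD b ' ' = c)) := by
    intro b hb
    have hwext := wb_ext (s.take i) c b (by omega)
    rw [ht] at hwext
    rw [← htx] at hwext
    rw [hlen1] at hwext
    rw [hwext]
    have hgd : (s.take i).getD b ' ' = s.getD b ' ' := by
      rw [(s.take i).getD_eq_getElem ' ' (by omega), List.getElem_take,
        s.getD_eq_getElem ' ' (by omega)]
    rw [hgd]
  by_cases hceq : c = s.getD r ' '
  · rw [if_pos hceq]
    apply le_antisymm
    · apply pvMpb_ge
      · omega
      · rw [hlen1]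
        exact (hext r hrlt).2 ⟨hrwb, hceq.symm⟩
    · rcases Nat.eq_zero_or_pos (pvMpb (s.take (i + 1))) with h0 | hpos
      · omega
      · have hMle : pvMpb (s.take (i + 1)) ≤ i := by
          have := pvMpb_le (s.take (i + 1))
          omega
        obtain ⟨b, hMb⟩ : ∃ b, pvMpb (s.take (i + 1)) = b + 1 :=
          ⟨pvMpb (s.take (i + 1)) - 1, by omega⟩
        have hMwb := pvMpb_spec (s.take (i + 1))
        rw [hlen1, hMb] at hMwb
        have hb := (hext b (by omega)).1 hMwb
        have hbk : b ≤ k := by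
          rw [hk]
          exact pvMpb_ge (s.take i) b (by omega) (by rw [ht]; exact hb.1)
        have := hrmax b hbk hb.1 hb.2
        omega
  · rw [if_neg hceq]
    have hr0 : r = 0 := by
      rcases hror with h | h
      · exact h
      · exact absurd h.symm hceq
    rcases Nat.eq_zero_or_pos (pvMpb (s.take (i + 1))) with h0 | hpos
    · omega
    · exfalso
      have hMle : pvMpb (s.take (i + 1)) ≤ i := by
        have := pvMpb_le (s.take (i + 1))
        omega
      obtain ⟨b, hMb⟩ : ∃ b, pvMpb (s.take (i + 1)) = b + 1 :=
        ⟨pvMpb (s.take (i + 1)) - 1, by omega⟩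
      have hMwb := pvMpb_spec (s.take (i + 1))
      rw [hlen1, hMb] at hMwb
      have hb := (hext b (by omega)).1 hMwb
      have hbk : b ≤ k := by
        rw [hk]
        exact pvMpb_ge (s.take i) b (by omega) (by rw [ht]; exact hb.1)
      have hble := hrmax b hbk hb.1 hb.2
      have hb0 : b = 0 := by omega
      subst hb0
      rw [← hr0] at hb
      exact hceq hb.2.symm
-- ============ part 6: the prefix-function array is mpb of every prefix ============
theorem pf_fold (s : List Char) : ∀ (m i₀ : Nat) (st : List Nat × Nat),
    st.1.length = s.length → i₀ + m = s.length → 1 ≤ i₀ →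
    st.2 = pvMpb (s.take i₀) →
    (∀ j, j < i₀ → st.1.getD j 0 = pvMpb (s.take (j + 1))) →
    (((List.range' i₀ m).foldl (pvPfStep s) st).1.length = s.length ∧
      ∀ j, j < s.length → ((List.range' i₀ m).foldl (pvPfStep s) st).1.getD j 0
        = pvMpb (s.take (j + 1))) := by
  intro m
  induction m with
  | zero =>
    intro i₀ st hlen hsum h1 _ hpi
    simp only [List.range'_zero, List.foldl_nil]
    exact ⟨hlen, fun j hj => hpi j (by omega)⟩
  | succ m ih =>
    intro i₀ st hlen hsum h1 hk hpi
    rw [List.range'_succ, List.foldl_cons]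
    have hi₀ : i₀ < s.length := by omega
    have hk2 := pfStep_mpb s st.1 st.2 i₀ h1 hi₀ hpi hk
    have hstep1 : (pvPfStep s st i₀).1 = st.1.set i₀ (pvPfStep s st i₀).2 := rfl
    have hset : ∀ j, j < i₀ + 1 → (pvPfStep s st i₀).1.getD j 0 = pvMpb (s.take (j + 1)) := by
      intro j hj
      rw [hstep1, getD_set']
      by_cases hji : i₀ = j
      · rw [if_pos ⟨hji, by omega⟩, ← hji]
        exact hk2
      · rw [if_neg (by tauto)]
        exact hpi j (by omega)
    have := ih (i₀ + 1) (pvPfStep s st i₀)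
      (by rw [hstep1, List.length_set]; exact hlen) (by omega) (by omega)
      (by rw [hk2]) hset
    have hst : pvPfStep s st i₀ = pvPfStep s (st.1, st.2) i₀ := rfl
    rw [hst] at this
    exact this

theorem pvPrefixFun_length (s : List Char) : (pvPrefixFun s).length = s.length := by
  unfold pvPrefixFun
  rcases Nat.eq_zero_or_pos s.length with h0 | hpos
  · simp [h0]
  · have hr : (List.range s.length).drop 1 = List.range' 1 (s.length - 1) := by
      rw [List.range_eq_range', List.drop_range']
    rw [hr]
    exact (pf_fold s (s.length - 1) 1 (List.replicate s.length 0, 0)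
      (by simp) (by omega) (by omega)
      (by
        have : pvMpb (s.take 1) = 0 := by
          have := pvMpb_le (s.take 1)
          have : (s.take 1).length = 1 := by simp; omega
          omega
        simp [this])
      (by
        intro j hj
        have hj0 : j = 0 := by omega
        subst hj0
        have h1 : pvMpb (s.take 1) = 0 := by
          have h2 := pvMpb_le (s.take 1)
          have h3 : (s.take 1).length = 1 := by simp; omega
          omega
        simp [h1])).1

theorem pvPrefixFun_getD (s : List Char) (j : Nat) (hj : j < s.length) :
    (pvPrefixFun s).getD j 0 = pvMpb (s.take (j + 1)) := by
  unfold pvPrefixFun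
  have hpos : 0 < s.length := by omega
  have hr : (List.range s.length).drop 1 = List.range' 1 (s.length - 1) := by
    rw [List.range_eq_range', List.drop_range']
  rw [hr]
  exact (pf_fold s (s.length - 1) 1 (List.replicate s.length 0, 0)
    (by simp) (by omega) (by omega)
    (by
      have h1 : pvMpb (s.take 1) = 0 := by
        have h2 := pvMpb_le (s.take 1)
        have h3 : (s.take 1).length = 1 := by simp; omega
        omega
      simp [h1])
    (by
      intro j hj
      have hj0 : j = 0 := by omega
      subst hj0
      have h1 : pvMpb (s.take 1) = 0 := by
        have h2 := pvMpb_le (s.take 1)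
        have h3 : (s.take 1).length = 1 := by simp; omega
        omega
      simp [h1])).2 j hj

-- pi[-1] (Source B: 'pi[-1] if pi else 0') is the maximal proper border of s
theorem pvPrefixFun_last (s : List Char) (hs : s ≠ []) :
    (match (pvPrefixFun s).getLast? with | some v => v | none => 0) = pvMpb s := by
  have hlen : (pvPrefixFun s).length = s.length := pvPrefixFun_length s
  have hpos : 0 < s.length := List.length_pos_iff.mpr hs
  have hne : pvPrefixFun s ≠ [] := by
    intro h
    rw [h] at hlen
    simp at hlen
    omega
  rw [List.getLast?_eq_getElem? ]
  rw [List.getElem?_eq_getElem (by omega)]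
  have := pvPrefixFun_getD s (s.length - 1) (by omega)
  rw [List.getD_eq_getElem _ _ (by omega)] at this
  simp only [hlen]
  rw [this, show s.length - 1 + 1 = s.length by omega, List.take_length]
-- ============ part 7: borders of y ++ sep :: x are exactly suffix-prefix overlaps ============
theorem sep_some (x' y' : List Char) (hx : '\x00' ∉ x') (hy : '\x00' ∉ y')
    (p : Nat) (hp : (y' ++ '\x00' :: x')[p]? = some '\x00') : p = y'.length := by
  rcases Nat.lt_trichotomy p y'.length with hlt | heq | hgt
  · rw [List.getElem?_append_left hlt] at hp
    exact absurd (List.mem_of_getElem? hp) hy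
  · exact heq
  · rw [List.getElem?_append_right (by omega)] at hp
    rw [show p - y'.length = (p - y'.length - 1) + 1 by omega, List.getElem?_cons_succ] at hp
    exact absurd (List.mem_of_getElem? hp) hx

theorem sep_at (x' y' : List Char) :
    (y' ++ '\x00' :: x')[y'.length]? = some '\x00' := by
  rw [List.getElem?_append_right (le_refl _)]
  simp

theorem border_iff (x' y' : List Char) (hx : '\x00' ∉ x') (hy : '\x00' ∉ y') (k : Nat)
    (hk : k < (y' ++ '\x00' :: x').length) :
    ((y' ++ '\x00' :: x').take k
        = (y' ++ '\x00' :: x').drop ((y' ++ '\x00' :: x').length - k))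
      ↔ (k ≤ x'.length ∧ k ≤ y'.length ∧ y'.take k = x'.drop (x'.length - k)) := by
  have hslen : (y' ++ '\x00' :: x').length = y'.length + x'.length + 1 := by
    simp
    omega
  have htake : k ≤ y'.length → (y' ++ '\x00' :: x').take k = y'.take k := by
    intro h
    rw [List.take_append_of_le_length h]
  have hdrop : k ≤ x'.length →
      (y' ++ '\x00' :: x').drop ((y' ++ '\x00' :: x').length - k) = x'.drop (x'.length - k) := by
    intro h
    rw [show (y' ++ '\x00' :: x').length - k = (y' ++ ['\x00']).length + (x'.length - k) by
        simp
        omega]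
    rw [show y' ++ '\x00' :: x' = (y' ++ ['\x00']) ++ x' by simp, List.drop_append]
    simp
  constructor
  · intro heq
    have hky : k ≤ y'.length := by
      by_contra hgt
      have hlt : y'.length < k := by omega
      have h1 : ((y' ++ '\x00' :: x').take k)[y'.length]? = some '\x00' := by
        rw [List.getElem?_take_of_lt hlt]
        exact sep_at x' y'
      rw [heq, List.getElem?_drop] at h1
      have := sep_some x' y' hx hy _ h1
      omega
    have hkx : k ≤ x'.length := by
      by_contra hgt
      have hlt : x'.length < k := by omega
      have hq : (y' ++ '\x00' :: x').length - k ≤ y'.length := by omega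
      have h1 : ((y' ++ '\x00' :: x').drop ((y' ++ '\x00' :: x').length - k))[
          y'.length - ((y' ++ '\x00' :: x').length - k)]? = some '\x00' := by
        rw [List.getElem?_drop,
          show (y' ++ '\x00' :: x').length - k
            + (y'.length - ((y' ++ '\x00' :: x').length - k)) = y'.length by omega]
        exact sep_at x' y'
      rw [← heq, List.getElem?_take_of_lt (by omega),
        List.getElem?_append_left (by omega)] at h1
      exact absurd (List.mem_of_getElem? h1) hy
    refine ⟨hkx, hky, ?_⟩
    rw [← htake hky, ← hdrop hkx]
    exact heq
  · rintro ⟨hkx, hky, h⟩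
    rw [htake hky, hdrop hkx]
    exact h

-- pvMpb of the separator string is the maximal overlap
theorem mpb_sep_spec (x' y' : List Char) (hx : '\x00' ∉ x') (hy : '\x00' ∉ y') :
    (pvMpb (y' ++ '\x00' :: x') ≤ x'.length ∧ pvMpb (y' ++ '\x00' :: x') ≤ y'.length ∧
      y'.take (pvMpb (y' ++ '\x00' :: x')) =
        x'.drop (x'.length - pvMpb (y' ++ '\x00' :: x'))) ∧
    (∀ k, k ≤ x'.length → k ≤ y'.length → y'.take k = x'.drop (x'.length - k) →
      k ≤ pvMpb (y' ++ '\x00' :: x')) := by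
  have hslen : (y' ++ '\x00' :: x').length = y'.length + x'.length + 1 := by
    simp
    omega
  constructor
  · have h1 := pvMpb_spec (y' ++ '\x00' :: x')
    have h2 := pvMpb_le (y' ++ '\x00' :: x')
    exact (border_iff x' y' hx hy _ (by omega)).1 h1
  · intro k h1 h2 h3
    exact pvMpb_ge _ k (by omega) ((border_iff x' y' hx hy k (by omega)).2 ⟨h1, h2, h3⟩)
-- ============ part 8: A's slice test on the truncated strings ============
theorem slice_cond (x y : String) (l e : Int) (hl : 2 ≤ l) (he : 0 ≤ e) (hel : e ≤ l - 2) :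
    (PySem.Str.slice x (some e) (some l) = PySem.Str.slice y (some 0) (some (l - e)))
      ↔ ((x.toList.take l.toNat).drop e.toNat
          = (y.toList.take l.toNat).take (l.toNat - e.toNat)) := by
  rw [String.ext_iff]
  have hx : (PySem.Str.slice x (some e) (some l)).toList
      = PySem.List.slice x.toList (some e) (some l) := by
    exact Eq.symm ((fun {l} {s} => String.ofList_eq.mp) rfl)
  have hy : (PySem.Str.slice y (some 0) (some (l - e))).toList
      = PySem.List.slice y.toList (some 0) (some (l - e)) := by
    exact Eq.symm ((fun {l} {s} => String.ofList_eq.mp) rfl)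
  rw [hx, hy]
  rw [PySem.List.slice_toNat _ he (by omega), PySem.List.slice_toNat _ (by omega) (by omega)]
  have h1 : (x.toList.take l.toNat).drop e.toNat = (x.toList.drop e.toNat).take (l.toNat - e.toNat) := by
    rw [List.drop_take]
  have h2 : (y.toList.take l.toNat).take (l.toNat - e.toNat) = y.toList.take (l.toNat - e.toNat) := by
    rw [List.take_take, min_eq_left (by omega)]
  rw [h1, h2]
  have h3 : (0 : Int).toNat = 0 := rfl
  rw [h3, List.drop_zero, show (l - e).toNat - 0 = (l - e).toNat by omega,
    show (l - e).toNat = l.toNat - e.toNat by omega]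
-- ============ part 9: first-match characterization of A's inner loop ============
theorem pvFirstE_nil (x y : String) (l : Int) (i j : Nat) :
    pvFirstE x y l i j [] = none := rfl

theorem pvFirstE_all_fail (x y : String) (l : Int) (i j : Nat) (es : List Int)
    (h : ∀ e ∈ es, ¬(PySem.Str.slice x (some e) (some l)
        = PySem.Str.slice y (some 0) (some (l - e)) ∧ i ≠ j)) :
    pvFirstE x y l i j es = none := by
  induction es with
  | nil => rfl
  | cons e es ih =>
    rw [pvFirstE, if_neg (h e (List.mem_cons_self))]
    exact ih (fun e' he' => h e' (List.mem_cons_of_mem _ he'))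

theorem pvFirstE_append (x y : String) (l : Int) (i j : Nat) (as bs : List Int) :
    pvFirstE x y l i j (as ++ bs)
      = match pvFirstE x y l i j as with
        | some e => some e
        | none => pvFirstE x y l i j bs := by
  induction as with
  | nil => rfl
  | cons a as ih =>
    rw [List.cons_append, pvFirstE, pvFirstE]
    by_cases h : PySem.Str.slice x (some a) (some l)
        = PySem.Str.slice y (some 0) (some (l - a)) ∧ i ≠ j
    · rw [if_pos h, if_pos h]
    · rw [if_neg h, if_neg h, ih]

theorem pvFirstE_eq_some (x y : String) (l : Int) (i j : Nat) (e₀ : Int)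
    (h0 : 0 ≤ e₀) (h1 : e₀ < l - 1)
    (hsat : PySem.Str.slice x (some e₀) (some l)
        = PySem.Str.slice y (some 0) (some (l - e₀)) ∧ i ≠ j)
    (hmin : ∀ e, 0 ≤ e → e < e₀ → ¬(PySem.Str.slice x (some e) (some l)
        = PySem.Str.slice y (some 0) (some (l - e)) ∧ i ≠ j)) :
    pvFirstE x y l i j (PySem.List.pyRange 0 (l - 1) 1) = some e₀ := by
  rw [PySem.List.pyRange_one_append 0 e₀ (l - 1) h0 (by omega), pvFirstE_append]
  rw [pvFirstE_all_fail x y l i j _ (fun e he => by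
    rw [PySem.List.mem_pyRange_one] at he
    exact hmin e he.1 he.2)]
  rw [PySem.List.pyRange_one_cons (by omega), pvFirstE, if_pos hsat]

theorem pvFirstE_eq_none (x y : String) (l : Int) (i j : Nat)
    (h : ∀ e, 0 ≤ e → e < l - 1 → ¬(PySem.Str.slice x (some e) (some l)
        = PySem.Str.slice y (some 0) (some (l - e)) ∧ i ≠ j)) :
    pvFirstE x y l i j (PySem.List.pyRange 0 (l - 1) 1) = none := by
  apply pvFirstE_all_fail
  intro e he
  rw [PySem.List.mem_pyRange_one] at he
  exact h e he.1 he.2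

theorem pvFirstE_self (x y : String) (l : Int) (i : Nat) (es : List Int) :
    pvFirstE x y l i i es = none := by
  apply pvFirstE_all_fail
  intro e _ h
  exact h.2 rfl
-- ============ part 10: per-pair equality of A's first hit and B's cell ============
theorem entry_eq (x y : String) (l : Int) (i j : Nat) (hij : i ≠ j) (hl : 2 ≤ l)
    (hx : '\x00' ∉ x.toList) (hy : '\x00' ∉ y.toList) :
    (match pvFirstE x y l i j (PySem.List.pyRange 0 (l - 1) 1) with
     | some e => e
     | none => l)
    = pvCell (x.toList.take l.toNat) (y.toList.take l.toNat) l := by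
  set L := l.toNat with hLdef
  set x' := x.toList.take L with hx'def
  set y' := y.toList.take L with hy'def
  have hLl : (L : Int) = l := Int.toNat_of_nonneg (by omega)
  have hL2 : 2 ≤ L := by omega
  have hx' : '\x00' ∉ x' := fun h => hx (List.mem_of_mem_take h)
  have hy' : '\x00' ∉ y' := fun h => hy (List.mem_of_mem_take h)
  have hlxL : x'.length ≤ L := by rw [hx'def]; exact List.length_take_le _ _
  have hlyL : y'.length ≤ L := by rw [hy'def]; exact List.length_take_le _ _
  -- the slice test is the overlap condition on the truncated strings
  have hAC : ∀ e : Int, 0 ≤ e → e ≤ l - 2 →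
      ((PySem.Str.slice x (some e) (some l)
          = PySem.Str.slice y (some 0) (some (l - e)) ∧ i ≠ j)
        ↔ x'.drop e.toNat = y'.take (L - e.toNat)) := by
    intro e he1 he2
    rw [slice_cond x y l e hl he1 he2]
    exact ⟨fun h => h.1, fun h => ⟨h, hij⟩⟩
  by_cases hfull : x'.length = L
  · -- |x'| = l : B runs the KMP pass; K is the maximal overlap
    obtain ⟨⟨hK1, hK2, hK3⟩, hKmax⟩ := mpb_sep_spec x' y' hx' hy'
    set K := pvMpb (y' ++ '\x00' :: x') with hKdef
    have hcell : pvCell x' y' l = if 2 ≤ K then l - (K : Int) else l := by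
      simp only [pvCell]
      rw [if_pos (by rw [hfull]; exact hLl), pvPrefixFun_last _ (by simp)]
    rw [hcell]
    -- any accepted cut point e has overlap L - e ≤ K
    have hACle : ∀ e : Int, 0 ≤ e → e ≤ l - 2 →
        x'.drop e.toNat = y'.take (L - e.toNat) → L - e.toNat ≤ K := by
      intro e he1 he2 hEq
      have hlen := congrArg List.length hEq
      simp only [List.length_drop, List.length_take] at hlen
      have hse : e.toNat ≤ L - 2 := by omega
      have h1 : L - e.toNat ≤ y'.length := by omega
      apply hKmax (L - e.toNat) (by omega) h1
      rw [show x'.length - (L - e.toNat) = e.toNat by omega]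
      exact hEq.symm
    by_cases h2K : 2 ≤ K
    · rw [if_pos h2K]
      -- first accepted cut point is l - K
      have hKL : K ≤ L := by omega
      have he₀ : (l - (K : Int)).toNat = L - K := by omega
      rw [pvFirstE_eq_some x y l i j (l - (K : Int)) (by omega) (by omega)
        (by
          apply (hAC (l - (K : Int)) (by omega) (by omega)).2
          rw [he₀, show L - (L - K) = K by omega, ← hfull]
          exact hK3.symm)
        (by
          intro e he1 helt
          intro hc
          have := hACle e he1 (by omega) ((hAC e he1 (by omega)).1 hc)
          omega)]
    · rw [if_neg h2K]
      rw [pvFirstE_eq_none x y l i j (by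
        intro e he1 helt hc
        have := hACle e he1 (by omega) ((hAC e he1 (by omega)).1 hc)
        omega)]
  · -- |x'| < l : the match must swallow all of y'
    have hlt : x'.length < L := by omega
    have hcell : pvCell x' y' l =
        if 0 ≤ (x'.length : Int) - (y'.length : Int) ∧
            (x'.length : Int) - (y'.length : Int) ≤ l - 2 ∧
            PySem.Chars.endswith x' y' = true
        then (x'.length : Int) - (y'.length : Int) else l := by
      simp only [pvCell]
      rw [if_neg (by omega)]
    rw [hcell]
    by_cases hcond : 0 ≤ (x'.length : Int) - (y'.length : Int) ∧
        (x'.length : Int) - (y'.length : Int) ≤ l - 2 ∧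
        PySem.Chars.endswith x' y' = true
    · rw [if_pos hcond]
      obtain ⟨hc1, hc2, hc3⟩ := hcond
      have hylex : y'.length ≤ x'.length := by omega
      have hsuf : y' <:+ x' := (PySem.Chars.endswith_iff _ _).1 hc3
      have hdropy : x'.drop (x'.length - y'.length) = y' := by
        obtain ⟨t, ht⟩ := hsuf
        rw [← ht, List.length_append,
          show t.length + y'.length - y'.length = t.length by omega, List.drop_left]
      have he₀ : ((x'.length : Int) - (y'.length : Int)).toNat = x'.length - y'.length := by
        omega
      rw [pvFirstE_eq_some x y l i j ((x'.length : Int) - (y'.length : Int)) hc1 (by omega)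
        (by
          apply (hAC _ hc1 hc2).2
          rw [he₀, hdropy, List.take_of_length_le (by omega)])
        (by
          intro e he1 helt hc
          have hEq := (hAC e he1 (by omega)).1 hc
          have hlen := congrArg List.length hEq
          simp only [List.length_drop, List.length_take] at hlen
          omega)]
    · rw [if_neg hcond]
      rw [pvFirstE_eq_none x y l i j (by
        intro e he1 helt hc
        have hEq := (hAC e he1 (by omega)).1 hc
        have hlen := congrArg List.length hEq
        simp only [List.length_drop, List.length_take] at hlen
        -- the length identity forces the B-side condition, contradicting hcond
        apply hcond
        have hyle : y'.length ≤ L - e.toNat := by omega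
        have hmin : min (L - e.toNat) y'.length = y'.length := by omega
        rw [hmin] at hlen
        rcases Nat.lt_or_ge x'.length e.toNat with hse | hse
        · have hy0 : y'.length = 0 := by omega
          have hynil : y' = [] := List.length_eq_zero_iff.1 hy0
          refine ⟨by omega, by omega, (PySem.Chars.endswith_iff _ _).2 (by
            rw [hynil]; exact List.nil_suffix)⟩
        · have hse' : e.toNat = x'.length - y'.length := by omega
          have hyx : y'.length ≤ x'.length := by omega
          have htk : y'.take (L - e.toNat) = y' := List.take_of_length_le (by omega)
          rw [htk] at hEq
          have hsuf : y' <:+ x' := hEq ▸ List.drop_suffix _ _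
          exact ⟨by omega, by omega, (PySem.Chars.endswith_iff _ _).2 hsuf⟩)]
-- ============ part 11: assembling the two programs ============
theorem dom_no_sep (data : List String) (l : Int) (hdom : Dom_problem_init data l)
    (s : String) (hs : s ∈ data) : '\x00' ∉ s.toList := by
  intro hmem
  unfold Dom_problem_init at hdom
  rw [Bool.and_eq_true] at hdom
  have h1 := List.all_eq_true.1 hdom.1 s hs
  unfold pvDomStr at h1
  have h2 := List.all_eq_true.1 h1 _ hmem
  exact absurd h2 (by decide)

-- ===== VERDICT (by name: the statement is the Claim_ definition above) =====
theorem problem_init_spec : Claim_equal_problem_init := by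
  intro data l hdom
  unfold Spec_problem_init
  rw [A_norm]
  simp only [problem_init_alt]
  by_cases hl : l ≤ 1
  · rw [if_pos hl]
    refine Prod.ext ?_ rfl
    simp only
    apply List.map_congr_left
    intro i _
    apply List.map_congr_left
    intro j _
    unfold aEntryF aHit
    rw [PySem.List.pyRange_one_eq_nil (by omega), pvFirstE_nil]
  · rw [if_neg hl]
    have hl2 : 2 ≤ l := by omega
    refine Prod.ext ?_ rfl
    simp only
    apply List.map_congr_left
    intro i hi
    apply List.map_congr_left
    intro j hj
    rw [List.mem_range] at hi hj
    by_cases hij : i = j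
    · rw [if_pos hij]
      unfold aEntryF aHit
      rw [hij, pvFirstE_self]
    · rw [if_neg hij]
      have hti : (data.map (fun s => PySem.List.slice s.toList none (some l))).getD i []
          = PySem.List.slice (data[i]'hi).toList none (some l) := by
        rw [List.getD_eq_getElem _ _ (by simpa using hi), List.getElem_map]
      have htj : (data.map (fun s => PySem.List.slice s.toList none (some l))).getD j []
          = PySem.List.slice (data[j]'hj).toList none (some l) := by
        rw [List.getD_eq_getElem _ _ (by simpa using hj), List.getElem_map]
      rw [hti, htj, PySem.List.slice_to _ (by omega), PySem.List.slice_to _ (by omega)]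
      have hgdi : data.getD i "" = data[i]'hi := List.getD_eq_getElem _ _ hi
      have hgdj : data.getD j "" = data[j]'hj := List.getD_eq_getElem _ _ hj
      unfold aEntryF aHit
      rw [hgdi, hgdj]
      exact entry_eq (data[i]'hi) (data[j]'hj) l i j hij hl2
        (dom_no_sep data l hdom _ (List.getElem_mem hi))
        (dom_no_sep data l hdom _ (List.getElem_mem hj))
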